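-- pv_equiv track=rewrite | github.com/lingkai5wu/LeetCode | problem/2663.py | smallestBeautifulString
-- ===== SOURCE A (Python) =====
-- def smallestBeautifulString(s: str, k: int) -> str:
--     a = ord('a')
--     k += a
--     s = list(map(ord, s))
--     n = len(s)
--     i = n - 1
--     s[i] += 1
--     while i < n:
--         if s[i] == k:
--             if i == 0:
--                 return ''
--             s[i] = a
--             i -= 1
--             s[i] += 1
--         elif i > 0 and s[i] == s[i - 1] or i > 1 and s[i] == s[i - 2]:
--             s[i] += 1
--         else:
--             i += 1
--     return ''.join(map(chr, s))
-- ===== SOURCE B (Python) =====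
-- def _next_free(t, kk, p1, p2):
--     # smallest candidate >= t that is not kk and differs from p1/p2; None = hit kk (carry)
--     while True:
--         if t == kk:
--             return None
--         if t == p1 or t == p2:
--             t += 1
--             continue
--         return t
--
--
-- def smallestBeautifulString(s: str, k: int) -> str:
--     a = ord('a')
--     kk = a + k
--     codes = [ord(c) for c in s]
--     n = len(codes)
--     # Phase 1 (backward): find the rightmost position p whose code can be raised.
--     p = n - 1
--     t = None
--     while p >= 0:
--         t = _next_free(codes[p] + 1, kk,
--                        codes[p - 1] if p >= 1 else None,
--                        codes[p - 2] if p >= 2 else None)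
--         if t is not None:
--             break
--         p -= 1
--     if p < 0:
--         return ''
--     # Phase 2 (forward): refill everything right of p with the smallest valid letters.
--     out = codes[:p] + [t]
--     for j in range(p + 1, n):
--         c = a
--         while c == out[j - 1] or (j >= 2 and c == out[j - 2]):
--             c += 1
--         out.append(c)
--     return ''.join(map(chr, out))
-- ===== Notes on version B (the rewrite author's own statement) =====
-- stated objective: alternative
-- what changed: A runs one bidirectional while-loop over a mutable buffer whose pointer moves left on carries and right on acceptance; B decomposes the task into two one-directional passes: a backward scan that finds the rightmost raisable position (via a small next-free-letter helper), then a forward pass that rebuilds the suffix by appending the smallest non-palindromic letter, never touching earlier state.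
-- outside the precondition, e.g. on smallestBeautifulString('!aa', 1): A returns '', B returns '"ab'; on smallestBeautifulString('zaa', 1): A does not finish within the time limit, B returns '{ab'
import Mathlib
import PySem

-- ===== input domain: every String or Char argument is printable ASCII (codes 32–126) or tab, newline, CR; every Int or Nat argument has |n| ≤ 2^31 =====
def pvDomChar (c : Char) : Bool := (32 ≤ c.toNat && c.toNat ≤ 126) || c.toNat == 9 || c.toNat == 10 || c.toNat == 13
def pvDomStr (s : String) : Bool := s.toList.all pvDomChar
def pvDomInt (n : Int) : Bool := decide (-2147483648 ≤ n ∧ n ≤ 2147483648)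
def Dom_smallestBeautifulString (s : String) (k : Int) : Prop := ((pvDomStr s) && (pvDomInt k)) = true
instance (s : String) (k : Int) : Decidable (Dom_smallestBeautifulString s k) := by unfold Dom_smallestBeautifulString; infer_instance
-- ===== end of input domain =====

-- B replaces A's single bidirectional carry loop by two one-directional passes (backward search
-- for the break position, then forward refill of the suffix); same cost, different decomposition.

-- ===== PORT A =====
-- chr(c): all codes chr is applied to are valid scalar values on the admitted inputs
def pvChr (c : Int) : Char := Char.ofNat c.toNat

-- the 'while i < n' loop of A; fuel-guarded (proved sufficient under Pre_); the buffer indices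
-- i, i-1, i-2 are only read/written under guards that keep them nonnegative, so .toNat is exact
def pvA_loop (kk : Int) (n : Nat) : Nat → List Int → Int → String
  | 0, _, _ => ""
  | fuel+1, s, i =>
    if i < (n : Int) then
      let v := s.getD i.toNat 0
      if v = kk then
        if i = 0 then ""
        else pvA_loop kk n fuel ((s.set i.toNat 97).set (i-1).toNat (s.getD (i-1).toNat 0 + 1)) (i-1)
      else if (1 ≤ i ∧ v = s.getD (i-1).toNat 0) ∨ (2 ≤ i ∧ v = s.getD (i-2).toNat 0) then
        pvA_loop kk n fuel (s.set i.toNat (v + 1)) i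
      else pvA_loop kk n fuel s (i + 1)
    else String.mk (s.map pvChr)

def smallestBeautifulString (s : String) (k : Int) : String :=
  let kk := k + 97                                    -- k += ord('a')
  let cs := s.toList.map (fun c => (c.toNat : Int))   -- s = list(map(ord, s))
  let n := cs.length
  if n = 0 then ""                                    -- Python raises IndexError here (outside Pre_)
  else pvA_loop kk n (8 * n + 8) (cs.set (n - 1) (cs.getD (n - 1) 0 + 1)) ((n : Int) - 1)

-- ===== PORT B =====
-- _next_free: smallest candidate ≥ t that is not kk and differs from p1/p2; none = hit kk (carry).
-- fuel-guarded (3 is enough: at most two conflicting candidates exist)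
def pvNextFree : Nat → Int → Int → Option Int → Option Int → Option Int
  | 0, _, _, _, _ => none
  | f+1, t, kk, p1, p2 =>
    if t = kk then none
    else if some t = p1 ∨ some t = p2 then pvNextFree f (t + 1) kk p1 p2
    else some t

def pvTry (kk : Int) (codes : List Int) (p : Nat) : Option Int :=
  pvNextFree 3 (codes.getD p 0 + 1) kk
    (if 1 ≤ p then some (codes.getD (p - 1) 0) else none)
    (if 2 ≤ p then some (codes.getD (p - 2) 0) else none)

-- phase 1 (backward): walk p from n-1 down to 0
def pvPhase1 (kk : Int) (codes : List Int) : Nat → Option (Nat × Int)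
  | 0 => match pvTry kk codes 0 with
         | some t => some (0, t)
         | none => none
  | p+1 => match pvTry kk codes (p+1) with
           | some t => some (p + 1, t)
           | none => pvPhase1 kk codes p

-- the inner 'while c == out[j-1] or …: c += 1' of phase 2 (fuel 3 is enough)
def pvScanF : Nat → Int → Int → Option Int → Int
  | 0, c, _, _ => c
  | f+1, c, p1, p2 => if c = p1 ∨ some c = p2 then pvScanF f (c + 1) p1 p2 else c

-- phase 2 (forward): append m smallest valid letters to out (j = out.length each round)
def pvFill : Nat → List Int → List Int
  | 0, out => out
  | m+1, out =>
    let j := out.length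
    let c := pvScanF 3 97 (out.getD (j - 1) 0) (if 2 ≤ j then some (out.getD (j - 2) 0) else none)
    pvFill m (out ++ [c])

def smallestBeautifulString_alt (s : String) (k : Int) : String :=
  let kk := 97 + k
  let codes := s.toList.map (fun c => (c.toNat : Int))
  let n := codes.length
  if n = 0 then ""
  else match pvPhase1 kk codes (n - 1) with
       | none => ""
       | some (p, t) => String.mk ((pvFill (n - (p + 1)) (codes.take p ++ [t])).map pvChr)

-- ===== PRECONDITION & SPEC =====
-- Pre_ excludes the empty string, on which A raises IndexError, and the degenerate alphabet
-- sizes k ∈ {0,1,2} (no beautiful string of length ≥ 3 exists there), on which A's carry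
-- re-enters the refill phase and A diverges on some inputs while returning accidental values
-- on others.
def Pre_smallestBeautifulString (s : String) (k : Int) : Prop := s ≠ "" ∧ (k < 0 ∨ 3 ≤ k)
instance (s : String) (k : Int) : Decidable (Pre_smallestBeautifulString s k) := by
  unfold Pre_smallestBeautifulString; infer_instance

def pvWitness_smallestBeautifulString : String × Int := ("abc", 4)

def Spec_smallestBeautifulString (s : String) (k : Int) (out : String) : Prop := out = smallestBeautifulString_alt s k
instance (s : String) (k : Int) (out : String) : Decidable (Spec_smallestBeautifulString s k out) := by unfold Spec_smallestBeautifulString; infer_instance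

-- ===== CLAIM (what is proved, stated in full; the proofs are below) =====
def Claim_equal_smallestBeautifulString : Prop := ∀ (s : String) (k : Int), Dom_smallestBeautifulString s k → Pre_smallestBeautifulString s k → Spec_smallestBeautifulString s k (smallestBeautifulString s k)


-- ===== LEMMAS AND PROOFS =====

-- list-indexing helpers
theorem pv_getD_append (T : List Int) (w : Int) (R : List Int) :
    (T ++ w :: R).getD T.length 0 = w := by
  induction T with
  | nil => rfl
  | cons a t ih => simpa using ih

theorem pv_getD_append_lt (T R : List Int) (j : Nat) (h : j < T.length) :
    (T ++ R).getD j 0 = T.getD j 0 := by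
  induction T generalizing j with
  | nil => simp at h
  | cons a t ih =>
    cases j with
    | zero => rfl
    | succ j => simpa using ih j (by simpa using h)

theorem pv_set_append (T : List Int) (w v : Int) (R : List Int) :
    (T ++ w :: R).set T.length v = T ++ v :: R := by
  induction T with
  | nil => rfl
  | cons a t ih => simpa using ih

theorem pv_take_getD (L : List Int) (i j : Nat) (h : j < i) :
    (L.take i).getD j 0 = L.getD j 0 := by
  induction L generalizing i j with
  | nil => simp
  | cons a t ih =>
    cases i with
    | zero => omega
    | succ i =>
      cases j with
      | zero => rfl
      | succ j => simpa using ih i j (by omega)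

theorem pv_take_succ (L : List Int) (i : Nat) (h : i < L.length) :
    L.take (i + 1) = L.take i ++ [L.getD i 0] := by
  induction L generalizing i with
  | nil => simp at h
  | cons a t ih =>
    cases i with
    | zero => simp [List.getD]
    | succ i => simpa using ih i (by simpa using h)

-- among three consecutive candidates at most two can conflict with the (≤ 2) neighbours
theorem pv_no3 (o1 o2 : Option Int) (w : Int)
    (h1 : some w = o1 ∨ some w = o2) (h2 : some (w + 1) = o1 ∨ some (w + 1) = o2) :
    ¬ (some (w + 2) = o1 ∨ some (w + 2) = o2) := by
  cases o1 <;> cases o2 <;> simp_all <;> omega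

-- A's palindrome test at index T.length of the buffer T ++ x :: R, phrased via the neighbours
theorem pv_condA (T R : List Int) (x : Int) (o1 o2 : Option Int)
    (ho1 : o1 = if 1 ≤ T.length then some (T.getD (T.length - 1) 0) else none)
    (ho2 : o2 = if 2 ≤ T.length then some (T.getD (T.length - 2) 0) else none) :
    ((1 ≤ (T.length : Int) ∧ x = (T ++ x :: R).getD ((T.length : Int) - 1).toNat 0) ∨
     (2 ≤ (T.length : Int) ∧ x = (T ++ x :: R).getD ((T.length : Int) - 2).toNat 0))
    ↔ (some x = o1 ∨ some x = o2) := by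
  subst ho1 ho2
  by_cases h1 : 1 ≤ T.length
  case neg =>
    rw [if_neg h1, if_neg (by omega : ¬ 2 ≤ T.length)]
    constructor
    · rintro (⟨hc, -⟩ | ⟨hc, -⟩)
      · exact absurd (by exact_mod_cast hc) h1
      · exact absurd (by omega : 1 ≤ T.length) h1
    · rintro (hx | hx) <;> simp at hx
  case pos =>
    have e1 : ((T.length : Int) - 1).toNat = T.length - 1 := by omega
    have g1 : (T ++ x :: R).getD (T.length - 1) 0 = T.getD (T.length - 1) 0 :=
      pv_getD_append_lt T (x :: R) (T.length - 1) (by omega)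
    by_cases h2 : 2 ≤ T.length
    case pos =>
      have e2 : ((T.length : Int) - 2).toNat = T.length - 2 := by omega
      have g2 : (T ++ x :: R).getD (T.length - 2) 0 = T.getD (T.length - 2) 0 :=
        pv_getD_append_lt T (x :: R) (T.length - 2) (by omega)
      rw [e1, e2, g1, g2, if_pos h1, if_pos h2]
      constructor
      · rintro (⟨-, hx⟩ | ⟨-, hx⟩)
        · exact Or.inl (by simp [hx])
        · exact Or.inr (by simp [hx])
      · rintro (hx | hx)
        · exact Or.inl ⟨by exact_mod_cast h1, by simpa using hx⟩
        · exact Or.inr ⟨by exact_mod_cast h2, by simpa using hx⟩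
    case neg =>
      rw [e1, g1, if_pos h1, if_neg h2]
      constructor
      · rintro (⟨-, hx⟩ | ⟨hc, -⟩)
        · exact Or.inl (by simp [hx])
        · exact absurd (by exact_mod_cast hc) h2
      · rintro (hx | hx)
        · exact Or.inl ⟨by exact_mod_cast h1, by simpa using hx⟩
        · simp at hx

-- one accepted step of A: valid letter at index T.length, pointer moves right
theorem pv_accept_step (kk : Int) (n : Nat) (T R : List Int) (t : Int) (o1 o2 : Option Int)
    (ho1 : o1 = if 1 ≤ T.length then some (T.getD (T.length - 1) 0) else none)
    (ho2 : o2 = if 2 ≤ T.length then some (T.getD (T.length - 2) 0) else none)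
    (hlt : (T.length : Int) < (n : Int)) (htkk : t ≠ kk)
    (hC : ¬ (some t = o1 ∨ some t = o2)) (f : Nat) :
    pvA_loop kk n (f + 1) (T ++ t :: R) (T.length : Int)
      = pvA_loop kk n f (T ++ t :: R) ((T.length : Int) + 1) := by
  simp only [pvA_loop]
  rw [if_pos hlt]
  have hv : (T ++ t :: R).getD ((T.length : Int)).toNat 0 = t := by
    simpa using pv_getD_append T t R
  rw [hv, if_neg htkk, if_neg (by rw [pv_condA T R t o1 o2 ho1 ho2]; exact hC)]

-- one conflicting step of A: the letter is bumped in place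
theorem pv_bump_step (kk : Int) (n : Nat) (T R : List Int) (t : Int) (o1 o2 : Option Int)
    (ho1 : o1 = if 1 ≤ T.length then some (T.getD (T.length - 1) 0) else none)
    (ho2 : o2 = if 2 ≤ T.length then some (T.getD (T.length - 2) 0) else none)
    (hlt : (T.length : Int) < (n : Int)) (htkk : t ≠ kk)
    (hC : some t = o1 ∨ some t = o2) (f : Nat) :
    pvA_loop kk n (f + 1) (T ++ t :: R) (T.length : Int)
      = pvA_loop kk n f (T ++ (t + 1) :: R) (T.length : Int) := by
  simp only [pvA_loop]
  rw [if_pos hlt]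
  have hv : (T ++ t :: R).getD ((T.length : Int)).toNat 0 = t := by
    simpa using pv_getD_append T t R
  rw [hv, if_neg htkk, if_pos (by rw [pv_condA T R t o1 o2 ho1 ho2]; exact hC)]
  have hs : (T ++ t :: R).set ((T.length : Int)).toNat (t + 1) = T ++ (t + 1) :: R := by
    simpa using pv_set_append T t (t + 1) R
  rw [hs]

-- the carry step at index 0: A returns ''
theorem pv_carry_zero (kk : Int) (n : Nat) (R : List Int) (f : Nat)
    (h0 : (0 : Int) < (n : Int)) :
    pvA_loop kk n (f + 1) (kk :: R) ((0 : Nat) : Int) = "" := by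
  simp only [pvA_loop]
  rw [if_pos (by exact_mod_cast h0)]
  simp

-- the carry step at index T'.length + 1: reset to 97, move left, bump the neighbour
theorem pv_carry_step (kk : Int) (n : Nat) (T' : List Int) (x : Int) (R : List Int) (f : Nat)
    (hlt : (((T'.length + 1 : Nat)) : Int) < (n : Int)) :
    pvA_loop kk n (f + 1) ((T' ++ [x]) ++ kk :: R) (((T'.length + 1 : Nat)) : Int)
      = pvA_loop kk n f (T' ++ (x + 1) :: 97 :: R) ((T'.length : Nat) : Int) := by
  have hTlen : (T' ++ [x]).length = T'.length + 1 := by simp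
  simp only [pvA_loop]
  rw [if_pos hlt]
  have hv : ((T' ++ [x]) ++ kk :: R).getD (((T'.length + 1 : Nat) : Int)).toNat 0 = kk := by
    have := pv_getD_append (T' ++ [x]) kk R
    rw [hTlen] at this
    simpa using this
  rw [hv, if_pos rfl, if_neg (by omega : ¬ ((T'.length + 1 : Nat) : Int) = 0)]
  have e1 : (((T'.length + 1 : Nat) : Int)).toNat = T'.length + 1 := by omega
  have hset1 : ((T' ++ [x]) ++ kk :: R).set (((T'.length + 1 : Nat) : Int)).toNat 97
      = T' ++ x :: 97 :: R := by
    rw [e1]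
    have := pv_set_append (T' ++ [x]) kk 97 R
    rw [hTlen] at this
    rw [this]
    simp
  rw [hset1]
  have e2 : (((T'.length + 1 : Nat) : Int) - 1).toNat = T'.length := by omega
  have hg : ((T' ++ [x]) ++ kk :: R).getD ((((T'.length + 1 : Nat) : Int)) - 1).toNat 0 = x := by
    rw [e2]
    have h1 : ((T' ++ [x]) ++ kk :: R).getD T'.length 0 = (T' ++ [x]).getD T'.length 0 :=
      pv_getD_append_lt (T' ++ [x]) (kk :: R) T'.length (by simp)
    rw [h1]
    exact pv_getD_append T' x []
  rw [hg]
  have hset2 : (T' ++ x :: 97 :: R).set ((((T'.length + 1 : Nat) : Int)) - 1).toNat (x + 1)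
      = T' ++ (x + 1) :: 97 :: R := by
    rw [e2]
    exact pv_set_append T' x (x + 1) (97 :: R)
  rw [hset2]
  congr 1
  omega

theorem pv_micro (kk : Int) (n : Nat) (T R : List Int) (w : Int)
    (hlt : (T.length : Int) < (n : Int)) (o1 o2 : Option Int)
    (ho1 : o1 = if 1 ≤ T.length then some (T.getD (T.length - 1) 0) else none)
    (ho2 : o2 = if 2 ≤ T.length then some (T.getD (T.length - 2) 0) else none) :
    ∃ (d : Nat) (t : Int), d ≤ 2 ∧ t = w + (d : Int) ∧
      (∀ f, pvA_loop kk n (f + d) (T ++ w :: R) (T.length : Int)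
            = pvA_loop kk n f (T ++ t :: R) (T.length : Int)) ∧
      ((t = kk ∧ pvNextFree 3 w kk o1 o2 = none) ∨
       (t ≠ kk ∧ ¬ (some t = o1 ∨ some t = o2) ∧ pvNextFree 3 w kk o1 o2 = some t)) := by
  have unf : ∀ (g : Nat) (c : Int), pvNextFree (g + 1) c kk o1 o2 =
      if c = kk then none
      else if some c = o1 ∨ some c = o2 then pvNextFree g (c + 1) kk o1 o2
      else some c := fun g c => rfl
  by_cases hw : w = kk
  · exact ⟨0, w, by omega, by omega, fun f => rfl,
      Or.inl ⟨hw, by rw [show (3 : Nat) = 2 + 1 from rfl, unf, if_pos hw]⟩⟩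
  · by_cases hCw : some w = o1 ∨ some w = o2
    · have step1 := fun f => pv_bump_step kk n T R w o1 o2 ho1 ho2 hlt hw hCw f
      by_cases hw1 : w + 1 = kk
      · refine ⟨1, w + 1, by omega, by omega, step1, Or.inl ⟨hw1, ?_⟩⟩
        rw [show (3 : Nat) = 2 + 1 from rfl, unf, if_neg hw, if_pos hCw,
          show (2 : Nat) = 1 + 1 from rfl, unf, if_pos hw1]
      · by_cases hCw1 : some (w + 1) = o1 ∨ some (w + 1) = o2
        · have step2 := fun f => pv_bump_step kk n T R (w + 1) o1 o2 ho1 ho2 hlt hw1 hCw1 f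
          have run2 : ∀ f, pvA_loop kk n (f + 2) (T ++ w :: R) (T.length : Int)
              = pvA_loop kk n f (T ++ (w + 1 + 1) :: R) (T.length : Int) := by
            intro f
            have := step1 (f + 1)
            rw [show f + 2 = f + 1 + 1 from rfl, this, step2 f]
          have hnoC : ¬ (some (w + 2) = o1 ∨ some (w + 2) = o2) := pv_no3 o1 o2 w hCw hCw1
          by_cases hw2 : w + 2 = kk
          · refine ⟨2, w + 2, by omega, by omega, by
              simpa [show w + 1 + 1 = w + 2 by ring] using run2, Or.inl ⟨hw2, ?_⟩⟩
            rw [show (3 : Nat) = 2 + 1 from rfl, unf, if_neg hw, if_pos hCw,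
              show (2 : Nat) = 1 + 1 from rfl, unf, if_neg hw1, if_pos hCw1,
              show (1 : Nat) = 0 + 1 from rfl, unf,
              if_pos (show w + 1 + 1 = kk by omega)]
          · refine ⟨2, w + 2, by omega, by omega, by
              simpa [show w + 1 + 1 = w + 2 by ring] using run2, Or.inr ⟨hw2, hnoC, ?_⟩⟩
            rw [show (3 : Nat) = 2 + 1 from rfl, unf, if_neg hw, if_pos hCw,
              show (2 : Nat) = 1 + 1 from rfl, unf, if_neg hw1, if_pos hCw1,
              show (1 : Nat) = 0 + 1 from rfl, unf,
              if_neg (show ¬ w + 1 + 1 = kk by omega),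
              if_neg (show ¬ (some (w + 1 + 1) = o1 ∨ some (w + 1 + 1) = o2) by
                simpa [show w + 1 + 1 = w + 2 by ring] using hnoC)]
            simp [show w + 1 + 1 = w + 2 by ring]
        · refine ⟨1, w + 1, by omega, by omega, step1, Or.inr ⟨hw1, hCw1, ?_⟩⟩
          rw [show (3 : Nat) = 2 + 1 from rfl, unf, if_neg hw, if_pos hCw,
            show (2 : Nat) = 1 + 1 from rfl, unf, if_neg hw1, if_neg hCw1]
    · exact ⟨0, w, by omega, by omega, fun f => rfl,
        Or.inr ⟨hw, hCw, by rw [show (3 : Nat) = 2 + 1 from rfl, unf, if_neg hw, if_neg hCw]⟩⟩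

-- phase-2 scan agrees with _next_free whenever the latter accepts
theorem pv_scanF_of_nextFree (f : Nat) :
    ∀ (c kk p1 : Int) (o2 : Option Int) (t : Int),
      pvNextFree f c kk (some p1) o2 = some t → pvScanF f c p1 o2 = t := by
  induction f with
  | zero => intro c kk p1 o2 t h; simp [pvNextFree] at h
  | succ g ih =>
    intro c kk p1 o2 t h
    by_cases hkkc : c = kk
    · rw [show pvNextFree (g + 1) c kk (some p1) o2 = none by
        simp [pvNextFree, hkkc]] at h
      exact absurd h (by simp)
    · by_cases hC : c = p1 ∨ some c = o2
      · have hC' : some c = some p1 ∨ some c = o2 := by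
          rcases hC with h' | h'
          · exact Or.inl (by simp [h'])
          · exact Or.inr h'
        have : pvNextFree (g + 1) c kk (some p1) o2 = pvNextFree g (c + 1) kk (some p1) o2 := by
          show (if c = kk then none
            else if some c = some p1 ∨ some c = o2 then pvNextFree g (c + 1) kk (some p1) o2
            else some c) = _
          rw [if_neg hkkc, if_pos hC']
        rw [this] at h
        show (if c = p1 ∨ some c = o2 then pvScanF g (c + 1) p1 o2 else c) = t
        rw [if_pos hC]
        exact ih _ _ _ _ _ h
      · have hC' : ¬ (some c = some p1 ∨ some c = o2) := by
          intro h'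
          rcases h' with h' | h'
          · exact hC (Or.inl (by simpa using h'))
          · exact hC (Or.inr h')
        have : pvNextFree (g + 1) c kk (some p1) o2 = some c := by
          show (if c = kk then none
            else if some c = some p1 ∨ some c = o2 then pvNextFree g (c + 1) kk (some p1) o2
            else some c) = _
          rw [if_neg hkkc, if_neg hC']
        rw [this] at h
        show (if c = p1 ∨ some c = o2 then pvScanF g (c + 1) p1 o2 else c) = t
        rw [if_neg hC]
        simpa using h

theorem pv_fwd (kk : Int) (hk : kk ≤ 96 ∨ 100 ≤ kk) :
    ∀ (m : Nat) (P : List Int), P ≠ [] → ∀ (fuel : Nat), 3 * m + 1 ≤ fuel →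
    pvA_loop kk (P.length + m) fuel (P ++ List.replicate m 97) (P.length : Int)
      = String.mk ((pvFill m P).map pvChr) := by
  intro m
  induction m with
  | zero =>
    intro P hP fuel hf
    obtain ⟨f, rfl⟩ : ∃ f, fuel = f + 1 := ⟨fuel - 1, by omega⟩
    simp only [pvA_loop]
    rw [if_neg (by push_cast; omega : ¬ ((P.length : Int) < ((P.length + 0 : Nat) : Int)))]
    simp [pvFill]
  | succ m ih =>
    intro P hP fuel hf
    have hP1 : 1 ≤ P.length := List.length_pos_iff.mpr hP
    have hlt : (P.length : Int) < ((P.length + (m + 1) : Nat) : Int) := by push_cast; omega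
    obtain ⟨d, t, hd, ht, hrun, hcase⟩ :=
      pv_micro kk (P.length + (m + 1)) P (List.replicate m 97) 97 hlt _ _ rfl rfl
    rcases hcase with ⟨htkk, -⟩ | ⟨htkk, hnC, hnf⟩
    · exfalso; omega
    · obtain ⟨f, rfl⟩ : ∃ f, fuel = (f + 1) + d := ⟨fuel - 1 - d, by omega⟩
      rw [show List.replicate (m + 1) (97 : Int) = 97 :: List.replicate m 97 from rfl]
      rw [hrun (f + 1)]
      rw [pv_accept_step kk _ P _ t _ _ rfl rfl hlt htkk hnC f]
      have hfill : pvFill (m + 1) P = pvFill m (P ++ [t]) := by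
        have hscan : pvScanF 3 97 (P.getD (P.length - 1) 0)
            (if 2 ≤ P.length then some (P.getD (P.length - 2) 0) else none) = t := by
          apply pv_scanF_of_nextFree
          rw [if_pos hP1] at hnf
          exact hnf
        simp only [pvFill]
        rw [hscan]
      rw [hfill]
      have hassoc : P ++ t :: List.replicate m 97 = (P ++ [t]) ++ List.replicate m 97 := by simp
      have hlen : P.length + (m + 1) = (P ++ [t]).length + m := by simp; omega
      have hidx : (P.length : Int) + 1 = (((P ++ [t]).length : Nat) : Int) := by push_cast; simp
      rw [hassoc, hlen, hidx]
      exact ih (P ++ [t]) (by simp) f (by omega)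

theorem pv_bwd (kk : Int) (hk : kk ≤ 96 ∨ 100 ≤ kk) (orig : List Int) :
    ∀ (i : Nat), i < orig.length → ∀ (fuel : Nat), 3 * orig.length + 3 * (i + 1) + 1 ≤ fuel →
    pvA_loop kk orig.length fuel
        (orig.take i ++ (orig.getD i 0 + 1) :: List.replicate (orig.length - 1 - i) 97) (i : Int)
      = (match pvPhase1 kk orig i with
         | none => ""
         | some (p, t) =>
             String.mk ((pvFill (orig.length - (p + 1)) (orig.take p ++ [t])).map pvChr)) := by
  intro i
  induction i with
  | zero =>
    intro hi fuel hf
    have hT : (orig.take 0).length = 0 := by simp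
    have hlt : ((orig.take 0).length : Int) < (orig.length : Int) := by rw [hT]; exact_mod_cast hi
    obtain ⟨d, t, hd, ht, hrun, hcase⟩ :=
      pv_micro kk orig.length (orig.take 0) (List.replicate (orig.length - 1 - 0) 97)
        (orig.getD 0 0 + 1) hlt
        (if 1 ≤ 0 then some (orig.getD (0 - 1) 0) else none)
        (if 2 ≤ 0 then some (orig.getD (0 - 2) 0) else none)
        (by simp) (by simp)
    have htry : pvTry kk orig 0 = pvNextFree 3 (orig.getD 0 0 + 1) kk
        (if 1 ≤ 0 then some (orig.getD (0 - 1) 0) else none)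
        (if 2 ≤ 0 then some (orig.getD (0 - 2) 0) else none) := rfl
    have hidx : ((0 : Nat) : Int) = ((orig.take 0).length : Int) := by rw [hT]
    obtain ⟨f, rfl⟩ : ∃ f, fuel = (f + 1) + d := ⟨fuel - 1 - d, by omega⟩
    rw [hidx, hrun (f + 1)]
    rcases hcase with ⟨htkk, hnf⟩ | ⟨htkk, hnC, hnf⟩
    · -- carry at index 0: A returns ''
      rw [show orig.take 0 = ([] : List Int) from rfl]
      rw [show (([] : List Int).length : Int) = ((0 : Nat) : Int) by simp]
      rw [show ([] : List Int) ++ t :: List.replicate (orig.length - 1 - 0) 97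
            = t :: List.replicate (orig.length - 1 - 0) 97 from rfl]
      rw [htkk]
      rw [pv_carry_zero kk orig.length _ f (by exact_mod_cast hi)]
      simp only [pvPhase1]
      rw [htry, hnf]
    · -- accept at index 0
      have ho1z : (if 1 ≤ 0 then some (orig.getD (0 - 1) 0) else none)
          = if 1 ≤ (orig.take 0).length then
              some ((orig.take 0).getD ((orig.take 0).length - 1) 0) else none := by
        simp
      have ho2z : (if 2 ≤ 0 then some (orig.getD (0 - 2) 0) else none)
          = if 2 ≤ (orig.take 0).length then
              some ((orig.take 0).getD ((orig.take 0).length - 2) 0) else none := by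
        simp
      rw [pv_accept_step kk _ _ _ t _ _ ho1z ho2z hlt htkk hnC f]
      have hP : orig.take 0 ++ t :: List.replicate (orig.length - 1 - 0) 97
          = (orig.take 0 ++ [t]) ++ List.replicate (orig.length - 1 - 0) 97 := by simp
      have hn : orig.length = (orig.take 0 ++ [t]).length + (orig.length - 1 - 0) := by
        simp; omega
      have hidx2 : ((orig.take 0).length : Int) + 1 = (((orig.take 0 ++ [t]).length : Nat) : Int) := by
        push_cast; simp
      rw [hP, hidx2]
      have hfwd := pv_fwd kk hk (orig.length - 1 - 0) (orig.take 0 ++ [t]) (by simp) f (by omega)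
      rw [← hn] at hfwd
      rw [hfwd]
      simp only [pvPhase1]
      rw [htry, hnf]
      rw [show orig.length - 1 - 0 = orig.length - (0 + 1) by omega]
  | succ q ih =>
    intro hi fuel hf
    have hq : q < orig.length := by omega
    have hT : (orig.take (q + 1)).length = q + 1 := by
      simp [List.length_take]; omega
    have hlt : ((orig.take (q + 1)).length : Int) < (orig.length : Int) := by
      rw [hT]; exact_mod_cast hi
    have ho1 : (if 1 ≤ q + 1 then some (orig.getD (q + 1 - 1) 0) else none)
        = if 1 ≤ (orig.take (q + 1)).length then
            some ((orig.take (q + 1)).getD ((orig.take (q + 1)).length - 1) 0) else none := by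
      rw [hT, if_pos (by omega), if_pos (by omega)]
      rw [show q + 1 - 1 = q from rfl]
      rw [pv_take_getD orig (q + 1) q (by omega)]
    have ho2 : (if 2 ≤ q + 1 then some (orig.getD (q + 1 - 2) 0) else none)
        = if 2 ≤ (orig.take (q + 1)).length then
            some ((orig.take (q + 1)).getD ((orig.take (q + 1)).length - 2) 0) else none := by
      rw [hT]
      by_cases h2 : 2 ≤ q + 1
      · rw [if_pos h2, if_pos h2, pv_take_getD orig (q + 1) (q + 1 - 2) (by omega)]
      · rw [if_neg h2, if_neg h2]
    obtain ⟨d, t, hd, ht, hrun, hcase⟩ :=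
      pv_micro kk orig.length (orig.take (q + 1)) (List.replicate (orig.length - 1 - (q + 1)) 97)
        (orig.getD (q + 1) 0 + 1) hlt
        (if 1 ≤ q + 1 then some (orig.getD (q + 1 - 1) 0) else none)
        (if 2 ≤ q + 1 then some (orig.getD (q + 1 - 2) 0) else none) ho1 ho2
    have htry : pvTry kk orig (q + 1) = pvNextFree 3 (orig.getD (q + 1) 0 + 1) kk
        (if 1 ≤ q + 1 then some (orig.getD (q + 1 - 1) 0) else none)
        (if 2 ≤ q + 1 then some (orig.getD (q + 1 - 2) 0) else none) := rfl
    have hidx : ((q + 1 : Nat) : Int) = ((orig.take (q + 1)).length : Int) := by rw [hT]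
    obtain ⟨f, rfl⟩ : ∃ f, fuel = (f + 1) + d := ⟨fuel - 1 - d, by omega⟩
    rw [hidx, hrun (f + 1)]
    rcases hcase with ⟨htkk, hnf⟩ | ⟨htkk, hnC, hnf⟩
    · -- carry: move to position q
      have hsplit : orig.take (q + 1) = orig.take q ++ [orig.getD q 0] := pv_take_succ orig q hq
      have hTq : (orig.take q).length = q := by simp [List.length_take]; omega
      rw [htkk]
      rw [show ((orig.take (q + 1)).length : Int) = (((orig.take q).length + 1 : Nat) : Int) by
        rw [hT, hTq]]
      rw [hsplit]
      rw [pv_carry_step kk orig.length (orig.take q) (orig.getD q 0)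
        (List.replicate (orig.length - 1 - (q + 1)) 97) f
        (by rw [hTq]; exact_mod_cast hi)]
      rw [show (97 : Int) :: List.replicate (orig.length - 1 - (q + 1)) 97
            = List.replicate (orig.length - 1 - q) 97 by
        rw [show orig.length - 1 - q = (orig.length - 1 - (q + 1)) + 1 by omega,
          List.replicate_succ]]
      rw [show ((orig.take q).length : Int) = ((q : Nat) : Int) by rw [hTq]]
      rw [ih hq f (by omega)]
      simp only [pvPhase1]
      rw [htry, hnf]
    · -- accept at q + 1
      rw [pv_accept_step kk _ _ _ t _ _ ho1 ho2 hlt htkk hnC f]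
      have hP : orig.take (q + 1) ++ t :: List.replicate (orig.length - 1 - (q + 1)) 97
          = (orig.take (q + 1) ++ [t]) ++ List.replicate (orig.length - 1 - (q + 1)) 97 := by simp
      have hn : orig.length = (orig.take (q + 1) ++ [t]).length + (orig.length - 1 - (q + 1)) := by
        simp [hT]; omega
      have hidx2 : ((orig.take (q + 1)).length : Int) + 1
          = (((orig.take (q + 1) ++ [t]).length : Nat) : Int) := by push_cast; simp
      rw [hP, hidx2]
      have hfwd := pv_fwd kk hk (orig.length - 1 - (q + 1)) (orig.take (q + 1) ++ [t]) (by simp) f (by omega)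
      rw [← hn] at hfwd
      rw [hfwd]
      simp only [pvPhase1]
      rw [htry, hnf]
      rw [show orig.length - 1 - (q + 1) = orig.length - (q + 1 + 1) by omega]

-- ===== VERDICT (by name: the statement is the Claim_ definition above) =====
theorem pv_set_last (L : List Int) (v : Int) (h : L ≠ []) :
    L.set (L.length - 1) v = L.take (L.length - 1) ++ [v] := by
  induction L with
  | nil => exact absurd rfl h
  | cons a t ih =>
    cases t with
    | nil => simp
    | cons b u =>
      have h2 := ih (by simp)
      simp only [List.length_cons] at h2 ⊢
      rw [show u.length + 1 + 1 - 1 = u.length + 1 from rfl]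
      rw [show u.length + 1 - 1 = u.length from rfl] at h2
      rw [show (a :: b :: u).set (u.length + 1) v = a :: (b :: u).set u.length v from rfl,
        List.take_succ_cons, h2]
      simp

theorem smallestBeautifulString_spec : Claim_equal_smallestBeautifulString := by
  intro s k _ hpre
  obtain ⟨hs, hkr⟩ := hpre
  unfold Spec_smallestBeautifulString
  simp only [smallestBeautifulString, smallestBeautifulString_alt]
  set cs := s.toList.map (fun c => ((c.toNat : Int))) with hcs
  have hne : cs ≠ [] := by
    intro h
    apply hs
    rw [hcs] at h
    have h2 := List.map_eq_nil_iff.mp h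
    exact String.ext (by simpa using h2)
  have hn : ¬ cs.length = 0 := by simpa using hne
  rw [if_neg hn, if_neg hn]
  have hk96 : k + 97 ≤ 96 ∨ 100 ≤ k + 97 := by omega
  rw [Int.add_comm 97 k]
  have hstate : cs.set (cs.length - 1) (cs.getD (cs.length - 1) 0 + 1)
      = cs.take (cs.length - 1) ++ (cs.getD (cs.length - 1) 0 + 1)
          :: List.replicate (cs.length - 1 - (cs.length - 1)) 97 := by
    rw [show cs.length - 1 - (cs.length - 1) = 0 by omega]
    simpa using pv_set_last cs _ hne
  have hidx : (cs.length : Int) - 1 = ((cs.length - 1 : Nat) : Int) := by omega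
  rw [hstate, hidx]
  rw [pv_bwd (k + 97) hk96 cs (cs.length - 1) (by omega) (8 * cs.length + 8) (by omega)]
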